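-- pv_equiv track=rewrite | github.com/SonyaVitkovskaya/LOIS | lab1/defs.py | formula_to_list
-- ===== SOURCE A (Python) =====
-- def formula_to_list(formula):
--     formula = check_variable_name(formula)
--     formula = list(formula)
--     i = 0
--     while i < len(formula):
--         if formula[i] == '/' and i != len(formula)- 1:
--             if formula[i+1] =='\\':
--                 formula[i] = '&'
--                 formula.pop(i+1)
--                 i -= 1
--         if formula[i] == '\\' and i != len(formula)- 1:
--             if formula[i+1] =='/':
--                 formula[i] = '|'
--                 formula.pop(i+1)
--                 i -= 1
--         i += 1
--     return formula
--
-- def check_variable_name(input_str):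
--     output = list(input_str)
--     index = 0
--     while index < len(output):
--         c = output[index]
--         if c.isupper():
--             start_index = index + 1
--             while start_index < len(output) and output[start_index].isdigit() and not (output[start_index] == '0' and start_index == index + 1):
--                 start_index += 1
--             if start_index - index > 1:
--                 output[index:start_index] = [c]
--         index += 1
--     return ''.join(output)
-- ===== SOURCE B (Python) =====
-- import re
--
-- def formula_to_list(formula):
--     # collapse variable names: uppercase letter + digit run (not starting with 0) -> letter
--     s = re.sub(r'([A-Z])[1-9][0-9]*', r'\1', formula)
--     # rewrite operators in one left-to-right alternation pass
--     s = re.sub(r'/\\|\\/', lambda m: '&' if m.group(0) == '/\\' else '|', s)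
--     return list(s)
-- ===== Notes on version B (the rewrite author's own statement) =====
-- stated objective: idiomatic
-- what changed: Replaced the two hand-written index-walking while loops with in-place list surgery (slice assignment, pop) by two regex substitutions: a variable-name-collapse sub and a single left-to-right operator alternation sub.
import Mathlib
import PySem

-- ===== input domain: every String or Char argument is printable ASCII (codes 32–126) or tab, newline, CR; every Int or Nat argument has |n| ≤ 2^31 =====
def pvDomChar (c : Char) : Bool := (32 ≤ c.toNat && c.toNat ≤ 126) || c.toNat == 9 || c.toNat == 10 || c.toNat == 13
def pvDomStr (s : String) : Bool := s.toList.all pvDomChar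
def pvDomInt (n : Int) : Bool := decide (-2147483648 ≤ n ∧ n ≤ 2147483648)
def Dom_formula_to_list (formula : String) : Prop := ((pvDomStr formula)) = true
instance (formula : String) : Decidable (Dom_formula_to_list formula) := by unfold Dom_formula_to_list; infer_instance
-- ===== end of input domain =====

-- B replaces A's two index-walking, in-place list-editing while loops by two single
-- left-to-right structural passes (regex substitutions in Python); objective: idiomatic.


-- ===== PORT A =====
-- inner while of check_variable_name: advance start_index over digits,
-- refusing a leading '0' (the 'start_index == index + 1' clause)
def scanD (output : List Char) (index si : Nat) : Nat :=
  if h : si < output.length then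
    if PySem.Chars.isdigit output[si] && !(output[si] == '0' && si == index + 1) then
      scanD output index (si + 1)
    else si
  else si
termination_by output.length - si

-- outer while of check_variable_name; 'output[index:start_index] = [c]' is the
-- take/cons/drop splice, then index += 1
def cvnLoop (output : List Char) (index : Nat) : List Char :=
  if h : index < output.length then
    let c := output[index]
    if PySem.Chars.isupper c then
      let si := scanD output index (index + 1)
      if index + 1 < si then
        cvnLoop (output.take index ++ c :: output.drop si) (index + 1)
      else
        cvnLoop output (index + 1)
    else
      cvnLoop output (index + 1)
  else output
termination_by output.length - index
decreasing_by
  · simp [List.length_take, List.length_drop]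
    omega
  · omega
  · omega

def check_variable_name (input_str : String) : String :=
  String.ofList (cvnLoop input_str.toList 0)

-- the operator while loop; Python's two ifs are mutually exclusive in one iteration
-- (formula[i] is a single char, and after a replacement it is '&' or '|'), and after a
-- replacement 'i -= 1; i += 1' re-runs the loop with the same i; 'i != len-1' with
-- i < len is i+1 < len, and when it fails the iteration only does i += 1
def opLoop (f : List Char) (i : Nat) : List Char :=
  if h : i + 1 < f.length then
    if f[i] = '/' ∧ f[i + 1] = '\\' then
      opLoop ((f.set i '&').eraseIdx (i + 1)) i
    else if f[i] = '\\' ∧ f[i + 1] = '/' then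
      opLoop ((f.set i '|').eraseIdx (i + 1)) i
    else
      opLoop f (i + 1)
  else f
termination_by f.length - i
decreasing_by
  · simp [List.length_eraseIdx, List.length_set, h]
    omega
  · simp [List.length_eraseIdx, List.length_set, h]
    omega
  · omega

def formula_to_list (formula : String) : List String :=
  let f := check_variable_name formula
  (opLoop f.toList 0).map (fun c => String.ofList [c])

-- ===== PORT B =====
-- one pass of re.sub(r'([A-Z])[1-9][0-9]*', r'\1', …): at an uppercase letter followed
-- by a [1-9] digit, keep the letter and drop the whole digit run
def collapseVars : List Char → List Char
  | [] => []
  | [c] => [c]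
  | c :: d :: rest =>
    if ('A' ≤ c ∧ c ≤ 'Z') ∧ ('1' ≤ d ∧ d ≤ '9') then
      c :: collapseVars (rest.dropWhile fun e => decide ('0' ≤ e) && decide (e ≤ '9'))
    else
      c :: collapseVars (d :: rest)
termination_by l => l.length
decreasing_by
  · have := List.length_dropWhile_le (fun e => decide ('0' ≤ e) && decide (e ≤ '9')) rest
    simp
    omega
  · simp

-- one pass of re.sub(r'/\\|\\/', …): leftmost-first alternation
def rewriteOps : List Char → List Char
  | [] => []
  | [c] => [c]
  | c :: d :: rest =>
    if c = '/' ∧ d = '\\' then '&' :: rewriteOps rest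
    else if c = '\\' ∧ d = '/' then '|' :: rewriteOps rest
    else c :: rewriteOps (d :: rest)
termination_by l => l.length

def formula_to_list_alt (formula : String) : List String :=
  (rewriteOps (collapseVars formula.toList)).map (fun c => String.ofList [c])

-- ===== PRECONDITION & SPEC =====
def Spec_formula_to_list (formula : String) (out : List String) : Prop := out = formula_to_list_alt formula
instance (formula : String) (out : List String) : Decidable (Spec_formula_to_list formula out) := by unfold Spec_formula_to_list; infer_instance

-- ===== CLAIM (what is proved, stated in full; the proofs are below) =====
def Claim_equal_formula_to_list : Prop := ∀ (formula : String), Dom_formula_to_list formula → Spec_formula_to_list formula (formula_to_list formula)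

-- ===== LEMMAS AND PROOFS =====

lemma scanD_le (output : List Char) (index si : Nat) (h : si ≤ output.length) :
    scanD output index si ≤ output.length := by
  fun_induction scanD output index si <;> omega

lemma scanD_ge (output : List Char) (index si : Nat) : si ≤ scanD output index si := by
  fun_induction scanD output index si <;> omega

lemma char_one_le {d : Char} (h0 : ('0' : Char) ≤ d) (hne : d ≠ '0') : ('1' : Char) ≤ d := by
  simp only [Char.le_def, UInt32.le_iff_toNat_le] at h0 ⊢
  have h48 : ('0' : Char).val.toNat = 48 := by decide
  have h49 : ('1' : Char).val.toNat = 49 := by decide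
  have hne' : d.val.toNat ≠ 48 := by
    intro hx
    apply hne
    apply Char.ext
    apply UInt32.toNat_inj.mp
    rw [hx, h48]
  omega

lemma char_not_19 {d : Char} (h : PySem.Chars.isdigit d = false ∨ d = '0') :
    ¬(('1' : Char) ≤ d ∧ d ≤ '9') := by
  rintro ⟨h1, h9⟩
  rcases h with h | rfl
  · simp only [PySem.Chars.isdigit, Bool.and_eq_false_iff, decide_eq_false_iff_not] at h
    rcases h with h | h
    · exact h (le_trans (by decide) h1)
    · exact h h9
  · exact absurd h1 (by decide)

lemma scanD_drop (output : List Char) (index j : Nat) (hj : index + 1 < j) :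
    (output.drop j).dropWhile PySem.Chars.isdigit = output.drop (scanD output index j) := by
  fun_induction scanD output index j with
  | case1 j h hc ih =>
    conv_lhs => rw [List.drop_eq_getElem_cons h]
    rw [List.dropWhile_cons_of_pos (Bool.and_eq_true_iff.mp hc).1]
    exact ih (by omega)
  | case2 j h hc =>
    have hjne : (j == index + 1) = false := by simp; omega
    have hdig : PySem.Chars.isdigit output[j] = false := by
      by_contra hx
      rw [Bool.not_eq_false] at hx
      exact hc (by simp [hx, hjne])
    conv_lhs => rw [List.drop_eq_getElem_cons h]
    rw [List.dropWhile_cons_of_neg (by simp [hdig]), ← List.drop_eq_getElem_cons h]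
  | case3 j h =>
    rw [List.drop_eq_nil_of_le (by omega)]
    simp

lemma collapse_cons (c : Char) (l : List Char)
    (hng : ∀ d, l.head? = some d → ¬(('A' ≤ c ∧ c ≤ 'Z') ∧ ('1' ≤ d ∧ d ≤ '9'))) :
    collapseVars (c :: l) = c :: collapseVars l := by
  cases l with
  | nil => simp [collapseVars]
  | cons d t => rw [collapseVars, if_neg (hng d rfl)]

lemma cvnLoop_eq (output : List Char) (index : Nat) :
    cvnLoop output index = output.take index ++ collapseVars (output.drop index) := by
  fun_induction cvnLoop output index with
  | case1 output index h c hup si hlt ih =>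
    have hunf : scanD output index (index + 1) =
        if _ : index + 1 < output.length then
          (if PySem.Chars.isdigit output[index + 1]
                && !(output[index + 1] == '0' && index + 1 == index + 1)
           then scanD output index (index + 2) else index + 1)
        else index + 1 := by
      rw [scanD]
    have h1 : index + 1 < output.length := by
      by_contra h1
      rw [dif_neg h1] at hunf
      have : index + 1 < si := hlt
      omega
    rw [dif_pos h1] at hunf
    have h2 : (PySem.Chars.isdigit output[index + 1]
        && !(output[index + 1] == '0' && index + 1 == index + 1)) = true := by
      by_contra h2
      rw [if_neg h2] at hunf
      have : index + 1 < si := hlt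
      omega
    rw [if_pos h2] at hunf
    have heq2 : si = scanD output index (index + 2) := hunf
    simp only [beq_self_eq_true, Bool.and_true, Bool.and_eq_true, Bool.not_eq_eq_eq_not,
      Bool.not_true, beq_eq_false_iff_ne, ne_eq] at h2
    obtain ⟨hdig, hd0⟩ := h2
    have hd09 : ('0' : Char) ≤ output[index + 1] ∧ output[index + 1] ≤ '9' := by
      simpa [PySem.Chars.isdigit] using hdig
    have h19 : ('1' : Char) ≤ output[index + 1] ∧ output[index + 1] ≤ '9' :=
      ⟨char_one_le hd09.1 hd0, hd09.2⟩
    have hAZ : ('A' : Char) ≤ c ∧ c ≤ 'Z' := by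
      simpa [PySem.Chars.isupper] using hup
    have hslen : si ≤ output.length := by
      rw [heq2]
      exact scanD_le output index (index + 2) (by omega)
    have hL : (List.take index output).length = index := by
      simp [List.length_take]; omega
    have ht : (List.take index output ++ c :: List.drop si output).take (index + 1)
        = List.take index output ++ [c] := by
      rw [List.take_append, List.take_of_length_le (by omega), hL]
      norm_num
    have hdr : (List.take index output ++ c :: List.drop si output).drop (index + 1)
        = List.drop si output := by
      rw [List.drop_append, List.drop_eq_nil_of_le (by omega), hL]
      norm_num
    have hdi : List.drop index output = c :: output[index + 1] :: List.drop (index + 2) output := by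
      rw [List.drop_eq_getElem_cons h, List.drop_eq_getElem_cons h1]
    have hfun : (fun e => decide (('0' : Char) ≤ e) && decide (e ≤ '9')) = PySem.Chars.isdigit := rfl
    rw [ih, ht, hdr, hdi, collapseVars, if_pos ⟨hAZ, h19⟩, hfun,
      scanD_drop output index (index + 2) (by omega), ← heq2]
    simp
  | case2 output index h c hup si hnl ih =>
    have hsi : si = index + 1 := by
      have := scanD_ge output index (index + 1)
      omega
    have hunf : scanD output index (index + 1) =
        if _ : index + 1 < output.length then
          (if PySem.Chars.isdigit output[index + 1]
                && !(output[index + 1] == '0' && index + 1 == index + 1)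
           then scanD output index (index + 2) else index + 1)
        else index + 1 := by
      rw [scanD]
    rw [ih, List.drop_eq_getElem_cons h]
    have hcc : collapseVars (output[index] :: List.drop (index + 1) output)
        = output[index] :: collapseVars (List.drop (index + 1) output) := by
      by_cases h1 : index + 1 < output.length
      · rw [dif_pos h1] at hunf
        have h2 : ¬ (PySem.Chars.isdigit output[index + 1]
            && !(output[index + 1] == '0' && index + 1 == index + 1)) = true := by
          intro h2
          rw [if_pos h2] at hunf
          have := scanD_ge output index (index + 2)
          omega
        simp only [beq_self_eq_true, Bool.and_true, Bool.and_eq_true, Bool.not_eq_eq_eq_not,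
          Bool.not_true, beq_eq_false_iff_ne, ne_eq, not_and, not_not] at h2
        have hnd : PySem.Chars.isdigit output[index + 1] = false ∨ output[index + 1] = '0' := by
          by_cases hx : PySem.Chars.isdigit output[index + 1] = true
          · exact Or.inr (h2 hx)
          · exact Or.inl (by simpa using hx)
        apply collapse_cons
        intro d hd
        rw [List.drop_eq_getElem_cons h1] at hd
        simp only [List.head?_cons, Option.some.injEq] at hd
        subst hd
        intro hcon
        exact char_not_19 hnd hcon.2
      · rw [List.drop_eq_nil_of_le (by omega)]
        simp [collapseVars]
    rw [hcc, List.take_succ_eq_append_getElem h]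
    simp only [List.append_assoc, List.singleton_append]
  | case3 output index h c hup ih =>
    rw [ih, List.drop_eq_getElem_cons h, collapse_cons, List.take_succ_eq_append_getElem h]
    · simp only [List.append_assoc, List.singleton_append]
    · intro d _ hcon
      exact hup (by
        simp only [PySem.Chars.isupper, Bool.and_eq_true, decide_eq_true_eq]
        exact hcon.1)
  | case4 output index h =>
    rw [List.take_of_length_le (by omega), List.drop_eq_nil_of_le (by omega)]
    simp [collapseVars]

lemma rewriteOps_cons_of_ne (c : Char) (l : List Char) (h1 : c ≠ '/') (h2 : c ≠ '\\') :
    rewriteOps (c :: l) = c :: rewriteOps l := by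
  cases l with
  | nil => simp [rewriteOps]
  | cons d t => simp [rewriteOps, h1, h2]

lemma opLoop_eq (f : List Char) (i : Nat) :
    opLoop f i = f.take i ++ rewriteOps (f.drop i) := by
  fun_induction opLoop f i with
  | case1 f i h hc ih =>
    have hi : i < f.length := by omega
    have hset : f.set i '&' = (f.take i ++ ['&']) ++ f.drop (i + 1) := by
      rw [List.set_eq_take_cons_drop _ hi]; simp
    have hlen : (f.take i ++ ['&']).length = i + 1 := by
      simp [List.length_take]; omega
    have hf' : (f.set i '&').eraseIdx (i + 1) = f.take i ++ '&' :: f.drop (i + 2) := by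
      rw [hset, List.eraseIdx_append_of_length_le (by omega)]
      simp [hlen, List.eraseIdx_zero, List.tail_drop]
    have ht : (f.take i ++ '&' :: f.drop (i + 2)).take i = f.take i := by
      rw [List.take_append_of_le_length (by simp [List.length_take]; omega)]
      simp [List.take_take]
    have hdr : (f.take i ++ '&' :: f.drop (i + 2)).drop i = '&' :: f.drop (i + 2) := by
      rw [List.drop_append_of_le_length (by simp [List.length_take]; omega)]
      simp
    rw [hf'] at ih
    rw [hf', ih, ht, hdr, rewriteOps_cons_of_ne _ _ (by decide) (by decide)]
    rw [List.drop_eq_getElem_cons hi, List.drop_eq_getElem_cons h]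
    simp [rewriteOps, hc.1, hc.2]
  | case2 f i h hc1 hc2 ih =>
    have hi : i < f.length := by omega
    have hset : f.set i '|' = (f.take i ++ ['|']) ++ f.drop (i + 1) := by
      rw [List.set_eq_take_cons_drop _ hi]; simp
    have hlen : (f.take i ++ ['|']).length = i + 1 := by
      simp [List.length_take]; omega
    have hf' : (f.set i '|').eraseIdx (i + 1) = f.take i ++ '|' :: f.drop (i + 2) := by
      rw [hset, List.eraseIdx_append_of_length_le (by omega)]
      simp [hlen, List.eraseIdx_zero, List.tail_drop]
    have ht : (f.take i ++ '|' :: f.drop (i + 2)).take i = f.take i := by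
      rw [List.take_append_of_le_length (by simp [List.length_take]; omega)]
      simp [List.take_take]
    have hdr : (f.take i ++ '|' :: f.drop (i + 2)).drop i = '|' :: f.drop (i + 2) := by
      rw [List.drop_append_of_le_length (by simp [List.length_take]; omega)]
      simp
    rw [hf'] at ih
    rw [hf', ih, ht, hdr, rewriteOps_cons_of_ne _ _ (by decide) (by decide)]
    rw [List.drop_eq_getElem_cons hi, List.drop_eq_getElem_cons h]
    simp [rewriteOps, hc2.1, hc2.2]
  | case3 f i h hc1 hc2 ih =>
    have hi : i < f.length := by omega
    have hsplit : List.drop i f = f[i] :: f[i + 1] :: List.drop (i + 2) f := by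
      rw [List.drop_eq_getElem_cons hi, List.drop_eq_getElem_cons h]
    have hr : rewriteOps (f[i] :: f[i + 1] :: List.drop (i + 2) f)
        = f[i] :: rewriteOps (f[i + 1] :: List.drop (i + 2) f) := by
      simp only [rewriteOps]
      rw [if_neg hc1, if_neg hc2]
    rw [ih, List.take_succ_eq_append_getElem hi, hsplit, List.drop_eq_getElem_cons h, hr]
    simp only [List.append_assoc, List.singleton_append]
  | case4 f i h =>
    cases hd : f.drop i with
    | nil =>
      have : f.length ≤ i := by
        have := congrArg List.length hd; simp at this; omega
      simp [rewriteOps, List.take_of_length_le this]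
    | cons x t =>
      have hlen := congrArg List.length hd
      simp at hlen
      have ht : t = [] := by
        have : t.length = 0 := by omega
        exact List.eq_nil_of_length_eq_zero this
      subst ht
      rw [rewriteOps]
      have := List.take_append_drop i f
      rw [hd] at this
      exact this.symm

-- ===== VERDICT (by name: the statement is the Claim_ definition above) =====
theorem formula_to_list_spec : Claim_equal_formula_to_list := by
  intro formula _
  unfold Spec_formula_to_list formula_to_list formula_to_list_alt check_variable_name
  simp [opLoop_eq, cvnLoop_eq, String.toList_ofList]
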